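-- pv_equiv track=rewrite | github.com/lacuna-tech/mds-core | cypress/utils/gen_stubs.py | parse_path_args
-- ===== SOURCE A (Python) =====
-- def parse_path_args(path):
--   url_params = {}
--   chunks = path.split('/')
--   augmented_path = ''
--   for chunk in chunks:
--     if chunk.startswith(':'):
--       arg = chunk.replace(':', '').replace('?', '')
--       url_params[arg] = 'some_value'
--       augmented_path += '${{{arg}}}/'.format(arg=arg)
--     else:
--       augmented_path += chunk + '/'
--   return url_params, augmented_path
-- ===== SOURCE B (Python) =====
-- def parse_path_args(path):
--   # Single streaming pass over the characters (with a '/' sentinel terminator);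
--   # never materializes the chunk list and uses no split/join/replace.
--   params = {}
--   augmented = ''
--   chunk = []
--   for ch in path + '/':
--     if ch == '/':
--       if chunk[:1] == [':']:
--         arg = ''.join(c for c in chunk if c not in ':?')
--         params[arg] = 'some_value'
--         augmented += '${' + arg + '}/'
--       else:
--         augmented += ''.join(chunk) + '/'
--       chunk = []
--     else:
--       chunk.append(ch)
--   return params, augmented
-- ===== Notes on version B (the rewrite author's own statement) =====
-- stated objective: alternative
-- what changed: Replaces A's split-into-chunks-then-loop algorithm (two replace calls per chunk) by a single character-level streaming tokenizer over the sentinel-terminated path that accumulates the current chunk itself, flushes it at each separator, and strips the colon and question-mark characters by one character filter, never calling split, join or replace.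
import Mathlib
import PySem

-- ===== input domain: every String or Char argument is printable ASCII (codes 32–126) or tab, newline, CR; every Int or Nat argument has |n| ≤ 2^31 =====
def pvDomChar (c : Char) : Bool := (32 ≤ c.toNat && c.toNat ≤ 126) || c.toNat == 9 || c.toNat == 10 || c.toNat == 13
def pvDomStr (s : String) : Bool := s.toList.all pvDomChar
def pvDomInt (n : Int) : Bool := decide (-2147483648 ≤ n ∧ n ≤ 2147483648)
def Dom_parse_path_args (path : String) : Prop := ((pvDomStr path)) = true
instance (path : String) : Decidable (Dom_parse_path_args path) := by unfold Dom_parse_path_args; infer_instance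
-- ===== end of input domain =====

-- B replaces A's split-into-chunks-then-loop algorithm by a single character-level
-- streaming tokenizer over the sentinel-terminated path, using no split/replace (objective: alternative).

-- ===== PORT A =====
def parse_path_args (path : String) : (List (String × String)) × String :=
  let chunks := (PySem.Str.split? path "/").getD []   -- split? is some: "/" ≠ ""
  let st := chunks.foldl
    (fun (st : PySem.Dict String String × String) chunk =>
      if PySem.Str.startswith chunk ":" then
        let arg := PySem.Str.replace (PySem.Str.replace chunk ":" "") "?" ""
        (st.1.insert arg "some_value", st.2 ++ "${" ++ arg ++ "}/")
      else
        (st.1, st.2 ++ chunk ++ "/"))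
    (PySem.Dict.empty, "")
  (st.1.items, st.2)

-- ===== PORT B =====
-- ''.join over a list of single characters is exactly String.ofList.
def parse_path_args_alt (path : String) : (List (String × String)) × String :=
  let st := (path ++ "/").toList.foldl
    (fun (st : PySem.Dict String String × String × List Char) ch =>
      if ch = '/' then
        if PySem.List.slice st.2.2 none (some 1) = [':'] then   -- chunk[:1] == [':']
          let arg := String.ofList (st.2.2.filter (fun c => !(c == ':' || c == '?')))
          (st.1.insert arg "some_value", st.2.1 ++ "${" ++ arg ++ "}/", ([] : List Char))
        else
          (st.1, st.2.1 ++ String.ofList st.2.2 ++ "/", ([] : List Char))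
      else
        (st.1, st.2.1, st.2.2 ++ [ch]))
    (PySem.Dict.empty, "", ([] : List Char))
  (st.1.items, st.2.1)

-- ===== PRECONDITION & SPEC =====
def Spec_parse_path_args (path : String) (out : (List (String × String)) × String) : Prop := out = parse_path_args_alt path
instance (path : String) (out : (List (String × String)) × String) : Decidable (Spec_parse_path_args path out) := by unfold Spec_parse_path_args; infer_instance

-- ===== CLAIM =====
def Claim_equal_parse_path_args : Prop := ∀ (path : String), Dom_parse_path_args path → Spec_parse_path_args path (parse_path_args path)

-- ===== LEMMAS AND PROOFS =====

-- A's per-chunk loop body, named (definitionally the lambda in port A)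
def ppaAstep (st : PySem.Dict String String × String) (chunk : String) :
    PySem.Dict String String × String :=
  if PySem.Str.startswith chunk ":" then
    let arg := PySem.Str.replace (PySem.Str.replace chunk ":" "") "?" ""
    (st.1.insert arg "some_value", st.2 ++ "${" ++ arg ++ "}/")
  else
    (st.1, st.2 ++ chunk ++ "/")

-- B's per-character loop body, named (definitionally the lambda in port B)
def ppaBstep (st : PySem.Dict String String × String × List Char) (ch : Char) :
    PySem.Dict String String × String × List Char :=
  if ch = '/' then
    if PySem.List.slice st.2.2 none (some 1) = [':'] then
      let arg := String.ofList (st.2.2.filter (fun c => !(c == ':' || c == '?')))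
      (st.1.insert arg "some_value", st.2.1 ++ "${" ++ arg ++ "}/", ([] : List Char))
    else
      (st.1, st.2.1 ++ String.ofList st.2.2 ++ "/", ([] : List Char))
  else
    (st.1, st.2.1, st.2.2 ++ [ch])

-- splitting on '/' with a current-chunk accumulator: the shape both loops meet
def ppaSplit : List Char → List Char → List (List Char)
  | [], cur => [cur]
  | c :: t, cur => if c = '/' then cur :: ppaSplit t [] else ppaSplit t (cur ++ [c])

theorem ppa_go_eq (fuel : Nat) (l cur : List Char) (acc : List (List Char)) (h : l.length < fuel) :
    PySem.Chars.splitOn.go ['/'] fuel l cur acc = acc.reverse ++ ppaSplit l cur.reverse := by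
  induction fuel generalizing l cur acc with
  | zero => omega
  | succ n ih =>
    cases l with
    | nil => rw [PySem.Chars.splitOn.go.eq_def]; simp [ppaSplit]
    | cons c rest =>
      rw [PySem.Chars.splitOn.go.eq_def]
      simp only []
      by_cases hc : c = '/'
      · subst hc
        rw [if_pos (by simp [List.isPrefixOf])]
        rw [show List.drop ['/'].length ('/' :: rest) = rest from rfl]
        rw [ih rest [] (cur.reverse :: acc) (by simp at h ⊢; omega)]
        simp [ppaSplit]
      · rw [if_neg (by simp [List.isPrefixOf]; intro hh; exact hc hh.symm)]
        rw [ih rest (c :: cur) acc (by simp at h ⊢; omega)]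
        simp [ppaSplit, hc]

theorem ppa_splitOn (l : List Char) :
    PySem.Chars.splitOn l ['/'] = ppaSplit l [] := by
  have := ppa_go_eq (l.length + 1) l [] [] (by omega)
  simpa [PySem.Chars.splitOn] using this

theorem ppa_go_filter (k : Char) (fuel : Nat) (l acc : List Char) (h : l.length ≤ fuel) :
    PySem.Chars.replace.go [k] [] fuel l acc
      = acc.reverse ++ l.filter (fun c => !(c == k)) := by
  induction fuel generalizing l acc with
  | zero =>
    have hl : l = [] := List.eq_nil_of_length_eq_zero (by omega)
    subst hl; rw [PySem.Chars.replace.go.eq_def]; simp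
  | succ n ih =>
    cases l with
    | nil => rw [PySem.Chars.replace.go.eq_def]; simp
    | cons c rest =>
      rw [PySem.Chars.replace.go.eq_def]
      simp only []
      by_cases hc : c = k
      · subst hc
        rw [if_pos (by simp [List.isPrefixOf])]
        rw [show List.drop [c].length (c :: rest) = rest from rfl,
            show ([] : List Char).reverse ++ acc = acc from by simp]
        rw [ih rest acc (by simp at h ⊢; omega)]
        simp
      · rw [if_neg (by simp [List.isPrefixOf]; intro hh; exact hc hh.symm)]
        rw [ih rest (c :: acc) (by simp at h ⊢; omega)]
        simp [hc]

-- replace with a 1-char pattern and empty replacement is a filter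
theorem ppa_replace_filter (k : Char) (l : List Char) :
    PySem.Chars.replace l [k] [] = l.filter (fun c => !(c == k)) := by
  rw [PySem.Chars.replace]
  simp only [List.isEmpty_cons, if_neg Bool.false_ne_true]
  exact ppa_go_filter k l.length l [] le_rfl

-- A's arg (two replaces) equals B's arg (one filter) on the same chunk
theorem ppa_arg_eq (cur : List Char) :
    PySem.Str.replace (PySem.Str.replace (String.ofList cur) ":" "") "?" ""
      = String.ofList (cur.filter (fun c => !(c == ':' || c == '?'))) := by
  apply String.toList_inj.mp
  simp only [PySem.Str.replace, String.toList_ofList]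
  rw [show (":" : String).toList = [':'] from rfl,
      show ("?" : String).toList = ['?'] from rfl,
      show ("" : String).toList = [] from rfl]
  rw [ppa_replace_filter, ppa_replace_filter, List.filter_filter]
  congr 1
  funext c
  by_cases h1 : c = ':' <;> by_cases h2 : c = '?' <;> simp [h1, h2, Bool.and_comm]

-- A's startswith test equals B's chunk[:1] test on the same chunk
theorem ppa_start_eq (cur : List Char) :
    PySem.Str.startswith (String.ofList cur) ":"
      = decide (PySem.List.slice cur none (some 1) = [':']) := by
  cases cur with
  | nil => simp [PySem.Str.startswith, PySem.Chars.startswith, PySem.List.slice]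
  | cons c t =>
    rw [show PySem.List.slice (c :: t) none (some 1) = (c :: t).take 1 from
      by exact_mod_cast PySem.List.slice_to_natCast (c :: t) 1]
    simp only [PySem.Str.startswith, String.toList_ofList]
    rw [show (":" : String).toList = [':'] from rfl]
    simp only [PySem.Chars.startswith, List.isPrefixOf, List.take, List.cons.injEq,
      and_true, Bool.and_true]
    rw [show (':' == c) = decide (c = ':') from by rw [Bool.beq_comm]; rfl]

-- flushing B's current chunk is exactly A's step on that chunk as a string
theorem ppa_flush (d : PySem.Dict String String) (s : String) (cur : List Char) :
    ppaBstep (d, s, cur) '/'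
      = ((ppaAstep (d, s) (String.ofList cur)).1,
         (ppaAstep (d, s) (String.ofList cur)).2, ([] : List Char)) := by
  simp only [ppaBstep, ppaAstep, ppa_start_eq cur, ppa_arg_eq cur]
  by_cases h : PySem.List.slice cur none (some 1) = [':'] <;> simp [h]

-- B's character fold over cs ++ ['/'] computes A's chunk fold over ppaSplit cs cur
theorem ppa_main (cs : List Char) (d : PySem.Dict String String) (s : String) (cur : List Char) :
    (cs ++ ['/']).foldl ppaBstep (d, s, cur)
      = ((((ppaSplit cs cur).map String.ofList).foldl ppaAstep (d, s)).1,
         (((ppaSplit cs cur).map String.ofList).foldl ppaAstep (d, s)).2,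
         ([] : List Char)) := by
  induction cs generalizing d s cur with
  | nil => simpa [ppaSplit] using ppa_flush d s cur
  | cons c t ih =>
    by_cases hc : c = '/'
    · subst hc
      simp only [List.cons_append, List.foldl_cons, ppa_flush d s cur,
        ppaSplit]
      exact ih _ _ []
    · have hstep : ppaBstep (d, s, cur) c = (d, s, cur ++ [c]) := by
        simp [ppaBstep, hc]
      simp only [List.cons_append, List.foldl_cons, hstep, ppaSplit, if_neg hc]
      exact ih d s (cur ++ [c])

-- ===== VERDICT =====
theorem parse_path_args_spec : Claim_equal_parse_path_args := by
  intro path _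
  unfold Spec_parse_path_args parse_path_args parse_path_args_alt
  rw [show (fun (st : PySem.Dict String String × String) chunk =>
      if PySem.Str.startswith chunk ":" then
        let arg := PySem.Str.replace (PySem.Str.replace chunk ":" "") "?" ""
        (st.1.insert arg "some_value", st.2 ++ "${" ++ arg ++ "}/")
      else
        (st.1, st.2 ++ chunk ++ "/")) = ppaAstep from rfl]
  rw [show (fun (st : PySem.Dict String String × String × List Char) ch =>
      if ch = '/' then
        if PySem.List.slice st.2.2 none (some 1) = [':'] then
          let arg := String.ofList (st.2.2.filter (fun c => !(c == ':' || c == '?')))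
          (st.1.insert arg "some_value", st.2.1 ++ "${" ++ arg ++ "}/", ([] : List Char))
        else
          (st.1, st.2.1 ++ String.ofList st.2.2 ++ "/", ([] : List Char))
      else
        (st.1, st.2.1, st.2.2 ++ [ch])) = ppaBstep from rfl]
  rw [show (PySem.Str.split? path "/").getD []
      = (ppaSplit path.toList []).map String.ofList from by
    simp [PySem.Str.split?, PySem.Chars.split?,
      show ("/" : String).toList = ['/'] from rfl, ppa_splitOn]]
  rw [show (path ++ "/").toList = path.toList ++ ['/'] from by
    simp [String.toList_append]]
  rw [ppa_main path.toList PySem.Dict.empty "" []]
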